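-- pv_equiv track=rewrite | github.com/alvintehg/Financial-Hallucination-Reliability-Index-FHRI- | scripts/evaluate_by_scenario.py | group_by_scenario
-- ===== SOURCE A (Python) =====
-- from collections import defaultdict
-- from typing import Dict, List, Any
--
-- def group_by_scenario(detailed_results: List[Dict[str, Any]]) -> Dict[str, List[Dict[str, Any]]]:
--     """Group evaluation results by detected scenario."""
--     scenario_groups = defaultdict(list)
--
--     for result in detailed_results:
--         # Get scenario from meta (if available)
--         scenario = result.get("scenario_detected", "default")
--         if not scenario:
--             scenario = "default"
--         scenario_groups[scenario].append(result)
--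
--     return dict(scenario_groups)
-- ===== SOURCE B (Python) =====
-- def group_by_scenario(detailed_results):
--     """Group evaluation results by detected scenario."""
--     def key(result):
--         scenario = result.get("scenario_detected", "default")
--         return scenario if scenario else "default"
--
--     keys = list(dict.fromkeys(key(r) for r in detailed_results))
--     return {k: [r for r in detailed_results if key(r) == k] for k in keys}
-- ===== Notes on version B (the rewrite author's own statement) =====
-- stated objective: alternative
-- what changed: Replaces the single-pass defaultdict bucketing with a dedup of the normalized keys (first-occurrence order) followed by one filter pass per distinct key.
import Mathlib
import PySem

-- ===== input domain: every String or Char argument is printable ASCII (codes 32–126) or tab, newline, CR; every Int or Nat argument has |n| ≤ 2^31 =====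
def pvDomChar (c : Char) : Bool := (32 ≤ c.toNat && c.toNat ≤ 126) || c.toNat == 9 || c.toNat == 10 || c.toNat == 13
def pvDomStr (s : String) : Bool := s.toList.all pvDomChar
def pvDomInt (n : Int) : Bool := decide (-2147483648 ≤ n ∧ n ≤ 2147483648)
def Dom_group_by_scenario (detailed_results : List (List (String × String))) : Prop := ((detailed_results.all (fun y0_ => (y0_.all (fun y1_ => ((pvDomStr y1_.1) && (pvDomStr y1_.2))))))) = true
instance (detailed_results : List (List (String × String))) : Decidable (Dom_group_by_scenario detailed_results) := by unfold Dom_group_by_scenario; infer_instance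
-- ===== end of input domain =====

-- B replaces A's single-pass defaultdict bucketing with key dedup + one filter pass per distinct key (alternative decomposition, same return value).


-- ===== PORT A =====
-- scenario = result.get("scenario_detected", "default"); if not scenario: scenario = "default"
def pvScenarioKey (result : List (String × String)) : String :=
  let scenario := (PySem.Dict.mk result).getD "scenario_detected" "default"
  if scenario = "" then "default" else scenario

def group_by_scenario (detailed_results : List (List (String × String))) : List (String × List (List (String × String))) :=
  (detailed_results.foldl
    (fun scenario_groups result =>
      scenario_groups.modify (pvScenarioKey result) [] (· ++ [result]))
    PySem.Dict.empty).items

-- ===== PORT B =====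
def group_by_scenario_alt (detailed_results : List (List (String × String))) : List (String × List (List (String × String))) :=
  let keys := PySem.List.dedup (detailed_results.map pvScenarioKey)
  keys.map (fun k => (k, detailed_results.filter (fun r => pvScenarioKey r == k)))

-- ===== PRECONDITION & SPEC =====
def Spec_group_by_scenario (detailed_results : List (List (String × String))) (out : List (String × List (List (String × String)))) : Prop := out = group_by_scenario_alt detailed_results
instance (detailed_results : List (List (String × String))) (out : List (String × List (List (String × String)))) : Decidable (Spec_group_by_scenario detailed_results out) := by unfold Spec_group_by_scenario; infer_instance

-- ===== CLAIM (what is proved, stated in full; the proofs are below) =====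
def Claim_equal_group_by_scenario : Prop := ∀ (detailed_results : List (List (String × String))), Dom_group_by_scenario detailed_results → Spec_group_by_scenario detailed_results (group_by_scenario detailed_results)

-- ===== LEMMAS AND PROOFS =====

-- A's grouping dict: keys are the normalized scenario keys, deduplicated in first-occurrence order
theorem keys_groupDict (l : List (List (String × String))) :
    (l.foldl (fun d r => PySem.Dict.modify d (pvScenarioKey r) [] (· ++ [r])) PySem.Dict.empty).keys
      = PySem.List.dedup (l.map pvScenarioKey) := by
  rw [PySem.Dict.keys_foldl_modify_key]
  simp [PySem.Dict.empty, PySem.Dict.keys, PySem.Set.update_eq_append_filter, PySem.Set.contains]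

theorem nodup_keys_groupDict (l : List (List (String × String))) :
    (l.foldl (fun d r => PySem.Dict.modify d (pvScenarioKey r) [] (· ++ [r])) PySem.Dict.empty).keys.Nodup := by
  exact PySem.Dict.nodup_keys_foldl_modify_key l pvScenarioKey [] (fun _ r => (· ++ [r]))
    PySem.Dict.empty PySem.Dict.nodup_keys_empty

-- A's group at key k is the filter of l by that key
theorem getD_groupDict (l : List (List (String × String))) (k : String) :
    (l.foldl (fun d r => PySem.Dict.modify d (pvScenarioKey r) [] (· ++ [r])) PySem.Dict.empty).getD k []
      = l.filter (fun r => pvScenarioKey r == k) := by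
  have hmap : l.foldl (fun d r => PySem.Dict.modify d (pvScenarioKey r) [] (· ++ [r])) PySem.Dict.empty
      = (l.map (fun r => (pvScenarioKey r, r))).foldl
          (fun d p => PySem.Dict.modify d p.1 [] (· ++ [p.2])) PySem.Dict.empty := by
    rw [List.foldl_map]
  rw [hmap, PySem.Dict.getD_foldl_modify_append]
  simp [List.filter_map, Function.comp_def]

-- ===== VERDICT (by name: the statement is the Claim_ definition above) =====
theorem group_by_scenario_spec : Claim_equal_group_by_scenario := by
  intro l _
  unfold Spec_group_by_scenario group_by_scenario group_by_scenario_alt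
  rw [PySem.Dict.items_eq_map_keys _ (nodup_keys_groupDict l) ([] : List (List (String × String)))]
  rw [keys_groupDict]
  exact List.map_congr_left (fun k _ => by rw [getD_groupDict])
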